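-- pv_equiv track=rewrite | github.com/Harigithub11/PII_Deidentification | src/core/monitoring/alert_workflow.py | _metrics_are_related
-- ===== SOURCE A (Python) =====
-- def _metrics_are_related(metric1: str, metric2: str) -> bool:
--     """Check if two metrics are related."""
--     related_groups = [
--         ['cpu_usage_percent', 'load_average_1m', 'load_average_5m'],
--         ['memory_usage_percent', 'memory_available_bytes', 'memory_used_bytes'],
--         ['disk_usage_percent', 'disk_free_bytes', 'disk_read_bytes_per_sec'],
--         ['request_duration_avg_ms', 'request_duration_p95_ms', 'error_rate_percent'],
--         ['db_query_duration_avg_ms', 'db_query_duration_p95_ms']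
--     ]
--
--     for group in related_groups:
--         if metric1 in group and metric2 in group:
--             return True
--
--     return False
-- ===== SOURCE B (Python) =====
-- _RELATED_GROUPS = [
--     ['cpu_usage_percent', 'load_average_1m', 'load_average_5m'],
--     ['memory_usage_percent', 'memory_available_bytes', 'memory_used_bytes'],
--     ['disk_usage_percent', 'disk_free_bytes', 'disk_read_bytes_per_sec'],
--     ['request_duration_avg_ms', 'request_duration_p95_ms', 'error_rate_percent'],
--     ['db_query_duration_avg_ms', 'db_query_duration_p95_ms']
-- ]
--
-- _GROUP_INDEX = {m: i for i, group in enumerate(_RELATED_GROUPS) for m in group}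
--
--
-- def _metrics_are_related(metric1: str, metric2: str) -> bool:
--     i = _GROUP_INDEX.get(metric1)
--     return i is not None and i == _GROUP_INDEX.get(metric2)
-- ===== Notes on version B (the rewrite author's own statement) =====
-- stated objective: idiomatic
-- what changed: Replaces the per-call scan over the group lists with a metric-to-group-index dict built once; the function is then two constant-time lookups plus an is-not-None-guarded equality.
import Mathlib
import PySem

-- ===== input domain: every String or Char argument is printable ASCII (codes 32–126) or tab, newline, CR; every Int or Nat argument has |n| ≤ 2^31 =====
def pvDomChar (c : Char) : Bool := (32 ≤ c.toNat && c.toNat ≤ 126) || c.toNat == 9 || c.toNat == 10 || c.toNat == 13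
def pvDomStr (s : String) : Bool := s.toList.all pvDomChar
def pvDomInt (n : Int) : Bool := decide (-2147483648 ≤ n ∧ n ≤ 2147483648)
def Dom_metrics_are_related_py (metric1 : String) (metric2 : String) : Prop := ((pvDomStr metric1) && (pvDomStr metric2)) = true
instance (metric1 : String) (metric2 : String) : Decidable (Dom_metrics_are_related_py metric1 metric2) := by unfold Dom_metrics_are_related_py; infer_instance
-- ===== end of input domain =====

-- B replaces A's per-call scan over the group lists by a metric→group-index dict built once,
-- then two lookups with an is-not-None guard (idiomatic; same return value everywhere).

-- ===== PORT A =====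
def pvRelatedGroups : List (List String) :=
  [ ["cpu_usage_percent", "load_average_1m", "load_average_5m"],
    ["memory_usage_percent", "memory_available_bytes", "memory_used_bytes"],
    ["disk_usage_percent", "disk_free_bytes", "disk_read_bytes_per_sec"],
    ["request_duration_avg_ms", "request_duration_p95_ms", "error_rate_percent"],
    ["db_query_duration_avg_ms", "db_query_duration_p95_ms"] ]

-- the 'for group in related_groups: if … return True' loop, returning False after the loop
def pvLoopA (metric1 : String) (metric2 : String) : List (List String) → Bool
  | [] => false
  | g :: rest =>
      if g.contains metric1 && g.contains metric2 then true
      else pvLoopA metric1 metric2 rest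

def metrics_are_related_py (metric1 : String) (metric2 : String) : Bool :=
  pvLoopA metric1 metric2 pvRelatedGroups

-- ===== PORT B =====
-- Source B's own copy of the group table
def pvRelatedGroupsB : List (List String) :=
  [ ["cpu_usage_percent", "load_average_1m", "load_average_5m"],
    ["memory_usage_percent", "memory_available_bytes", "memory_used_bytes"],
    ["disk_usage_percent", "disk_free_bytes", "disk_read_bytes_per_sec"],
    ["request_duration_avg_ms", "request_duration_p95_ms", "error_rate_percent"],
    ["db_query_duration_avg_ms", "db_query_duration_p95_ms"] ]

-- the module-level dict comprehension {m: i for i, group in enumerate(_RELATED_GROUPS) for m in group}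
def pvGroupIndex : PySem.Dict String Int :=
  (PySem.List.enumerate pvRelatedGroupsB).foldl
    (fun d p => p.2.foldl (fun d m => d.insert m p.1) d)
    PySem.Dict.empty

def metrics_are_related_py_alt (metric1 : String) (metric2 : String) : Bool :=
  match pvGroupIndex.get? metric1 with
  | none => false
  | some i => pvGroupIndex.get? metric2 == some i

-- ===== PRECONDITION & SPEC =====
def Spec_metrics_are_related_py (metric1 : String) (metric2 : String) (out : Bool) : Prop := out = metrics_are_related_py_alt metric1 metric2
instance (metric1 : String) (metric2 : String) (out : Bool) : Decidable (Spec_metrics_are_related_py metric1 metric2 out) := by unfold Spec_metrics_are_related_py; infer_instance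

-- ===== CLAIM (what is proved, stated in full; the proofs are below) =====
def Claim_equal_metrics_are_related_py : Prop := ∀ (metric1 : String) (metric2 : String), Dom_metrics_are_related_py metric1 metric2 → Spec_metrics_are_related_py metric1 metric2 (metrics_are_related_py metric1 metric2)

-- ===== LEMMAS AND PROOFS =====

def pvAllMetrics : List String :=
  ["cpu_usage_percent", "load_average_1m", "load_average_5m",
   "memory_usage_percent", "memory_available_bytes", "memory_used_bytes",
   "disk_usage_percent", "disk_free_bytes", "disk_read_bytes_per_sec",
   "request_duration_avg_ms", "request_duration_p95_ms", "error_rate_percent",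
   "db_query_duration_avg_ms", "db_query_duration_p95_ms"]

lemma pvLoopA_false_of_left_notin (m1 m2 : String) (h : m1 ∉ pvAllMetrics) :
    metrics_are_related_py m1 m2 = false := by
  simp only [pvAllMetrics, List.mem_cons, List.not_mem_nil, or_false, not_or] at h
  obtain ⟨a1,a2,a3,b1,b2,b3,c1,c2,c3,d1,d2,d3,e1,e2⟩ := h
  simp [metrics_are_related_py, pvLoopA, pvRelatedGroups,
    a1, a2, a3, b1, b2, b3, c1, c2, c3, d1, d2, d3, e1, e2]

lemma pvIndex_none_of_notin (m : String) (h : m ∉ pvAllMetrics) :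
    pvGroupIndex.get? m = none := by
  simp only [pvAllMetrics, List.mem_cons, List.not_mem_nil, or_false, not_or] at h
  obtain ⟨a1,a2,a3,b1,b2,b3,c1,c2,c3,d1,d2,d3,e1,e2⟩ := h
  have : pvGroupIndex = PySem.Dict.mk
    [("cpu_usage_percent",0),("load_average_1m",0),("load_average_5m",0),
     ("memory_usage_percent",1),("memory_available_bytes",1),("memory_used_bytes",1),
     ("disk_usage_percent",2),("disk_free_bytes",2),("disk_read_bytes_per_sec",2),
     ("request_duration_avg_ms",3),("request_duration_p95_ms",3),("error_rate_percent",3),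
     ("db_query_duration_avg_ms",4),("db_query_duration_p95_ms",4)] := by decide
  rw [this]
  simp [PySem.Dict.get?_mk_cons, PySem.Dict.get?_empty, Ne.symm a1, Ne.symm a2, Ne.symm a3, Ne.symm b1, Ne.symm b2,
    Ne.symm b3, Ne.symm c1, Ne.symm c2, Ne.symm c3, Ne.symm d1, Ne.symm d2, Ne.symm d3,
    Ne.symm e1, Ne.symm e2]
  rfl

lemma pvBothIn : ∀ m1 ∈ pvAllMetrics, ∀ m2 ∈ pvAllMetrics,
    metrics_are_related_py m1 m2 = metrics_are_related_py_alt m1 m2 := by decide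

lemma pvIn_notin (m1 : String) (_h1 : m1 ∈ pvAllMetrics) (m2 : String) (h2 : m2 ∉ pvAllMetrics) :
    metrics_are_related_py m1 m2 = false := by
  simp only [pvAllMetrics, List.mem_cons, List.not_mem_nil, or_false, not_or] at h2
  obtain ⟨a1,a2,a3,b1,b2,b3,c1,c2,c3,d1,d2,d3,e1,e2⟩ := h2
  simp [metrics_are_related_py, pvLoopA, pvRelatedGroups,
    a1, a2, a3, b1, b2, b3, c1, c2, c3, d1, d2, d3, e1, e2]

-- ===== VERDICT (by name: the statement is the Claim_ definition above) =====
theorem metrics_are_related_py_spec : Claim_equal_metrics_are_related_py := by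
  intro m1 m2 _
  unfold Spec_metrics_are_related_py
  by_cases h1 : m1 ∈ pvAllMetrics
  · by_cases h2 : m2 ∈ pvAllMetrics
    · exact pvBothIn m1 h1 m2 h2
    · rw [pvIn_notin m1 h1 m2 h2]
      simp only [metrics_are_related_py_alt, pvIndex_none_of_notin m2 h2]
      cases pvGroupIndex.get? m1 <;> rfl
  · rw [pvLoopA_false_of_left_notin m1 m2 h1]
    simp [metrics_are_related_py_alt, pvIndex_none_of_notin m1 h1]
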